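-- pv_equiv track=rewrite | github.com/ivpdev/rnn-keras | omq/omq_prepare.py | generate_seqs_from_words
-- ===== SOURCE A (Python) =====
-- hyper_params = {
--     'seq_length_chars': 10,
--     'seq_length_words': 3,
--     'empty_char': '\t'
-- }
--
-- def generate_seqs_from_words(words):
--     dataX = []
--     dataY = []
--     n_words = len(words)
--     seq_length = hyper_params['seq_length_words']
--     empty_char = '\t'
--
--     #TODO check if input is shorter then seq_length
--     for i in range(0, n_words - 1, 1):
--         if (i < (n_words - seq_length)):
--
--             seq_in = words[i:i + seq_length]
--             seq_out = words[i + seq_length]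
--         else:
--             seq_in = words[i:n_words] + [empty_char for j in range(0, (seq_length - (n_words - i)))] #(empty_char * (seq_length - (n_words - i)))
--             seq_out = empty_char
--
--         dataX.append(seq_in)
--         dataY.append(seq_out)
--
--     return dataX, dataY
-- ===== SOURCE B (Python) =====
-- hyper_params = {
--     'seq_length_chars': 10,
--     'seq_length_words': 3,
--     'empty_char': '\t'
-- }
--
-- def generate_seqs_from_words(words):
--     seq_length = hyper_params['seq_length_words']
--     empty_char = hyper_params['empty_char']
--     n = len(words)
--     m = max(n - 1, 0)
--     # columnar construction: one shifted-and-padded stream per window position,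
--     # windows are the transpose (zip) of the streams
--     streams = [(words[k:] + [empty_char] * k)[:m] for k in range(seq_length)]
--     dataX = [list(t) for t in zip(*streams)]
--     dataY = (words[seq_length:] + [empty_char] * seq_length)[:m]
--     return dataX, dataY
-- ===== Notes on version B (the rewrite author's own statement) =====
-- stated objective: alternative
-- what changed: B builds the result columnar-wise: it materialises one shifted-and-padded stream per window position and transposes them with zip to get the windows, instead of A's indexed loop that branches per position and slices/pads each window individually.
import Mathlib
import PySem

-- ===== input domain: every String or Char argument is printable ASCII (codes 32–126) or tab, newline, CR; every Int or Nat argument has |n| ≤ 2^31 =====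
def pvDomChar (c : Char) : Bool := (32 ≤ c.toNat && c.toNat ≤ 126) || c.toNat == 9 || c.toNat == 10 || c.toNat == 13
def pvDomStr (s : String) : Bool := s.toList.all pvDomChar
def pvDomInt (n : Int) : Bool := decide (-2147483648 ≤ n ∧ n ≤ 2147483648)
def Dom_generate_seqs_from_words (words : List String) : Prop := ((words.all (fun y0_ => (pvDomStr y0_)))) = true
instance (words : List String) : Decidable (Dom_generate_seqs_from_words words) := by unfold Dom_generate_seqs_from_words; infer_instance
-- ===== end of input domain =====

-- B builds the windows columnar-wise: one shifted-and-padded stream per window position,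
-- the windows being the transpose (zip) of the streams — no per-index loop or branch.


-- ===== PORT A =====
def generate_seqs_from_words (words : List String) : List (List String) × List String :=
  let n_words : Int := words.length
  let seq_length : Int := 3
  let empty_char : String := "\t"
  (PySem.List.pyRange 0 (n_words - 1) 1).foldl
    (fun (acc : List (List String) × List String) i =>
      let p :=
        if i < n_words - seq_length then
          (PySem.List.slice words (some i) (some (i + seq_length)),
           PySem.List.pyGetD words (i + seq_length) empty_char)
        else
          (PySem.List.slice words (some i) (some n_words) ++
             (PySem.List.pyRange 0 (seq_length - (n_words - i)) 1).map (fun _ => empty_char),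
           empty_char)
      (acc.1 ++ [p.1], acc.2 ++ [p.2]))
    ([], [])

-- ===== PORT B =====
def generate_seqs_from_words_alt (words : List String) : List (List String) × List String :=
  let seq_length : Int := 3
  let empty_char : String := "\t"
  let n : Int := words.length
  let m : Int := max (n - 1) 0
  -- streams[k] = (words[k:] + [empty_char]*k)[:m]
  let stream := fun (k : Nat) =>
    PySem.List.slice (PySem.List.slice words (some (k : Int)) none ++ List.replicate k empty_char)
      none (some m)
  let dataX := ((stream 0).zip ((stream 1).zip (stream 2))).map (fun t => [t.1, t.2.1, t.2.2])
  let dataY := PySem.List.slice (PySem.List.slice words (some seq_length) none ++ List.replicate 3 empty_char)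
      none (some m)
  (dataX, dataY)

-- ===== PRECONDITION & SPEC =====
def Spec_generate_seqs_from_words (words : List String) (out : List (List String) × List String) : Prop := out = generate_seqs_from_words_alt words
instance (words : List String) (out : List (List String) × List String) : Decidable (Spec_generate_seqs_from_words words out) := by unfold Spec_generate_seqs_from_words; infer_instance

-- ===== CLAIM (what is proved, stated in full; the proofs are below) =====
def Claim_equal_generate_seqs_from_words : Prop := ∀ (words : List String), Dom_generate_seqs_from_words words → Spec_generate_seqs_from_words words (generate_seqs_from_words words)

-- ===== LEMMAS AND PROOFS =====

-- a comprehension of a constant over range(m) is a replicate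
lemma map_const_pyRange (m : Int) (c : String) :
    (PySem.List.pyRange 0 m 1).map (fun _ => c) = List.replicate m.toNat c := by
  rw [List.eq_replicate_iff]
  refine ⟨by simp [PySem.List.length_pyRange_one], ?_⟩
  intro b hb
  simp only [List.mem_map] at hb
  obtain ⟨_, _, rfl⟩ := hb
  rfl

-- per-index agreement of A's branchy seq_in with a uniform slice of the padded list
lemma seq_in_eq (words : List String) (i : Int) (h0 : 0 ≤ i) (h1 : i < (words.length : Int) - 1) :
    (if i < (words.length : Int) - 3 then
        PySem.List.slice words (some i) (some (i + 3))
      else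
        PySem.List.slice words (some i) (some (words.length : Int)) ++
          (PySem.List.pyRange 0 (3 - ((words.length : Int) - i)) 1).map (fun _ => ("\t" : String))) =
    PySem.List.slice (words ++ List.replicate 3 "\t") (some i) (some (i + 3)) := by
  obtain ⟨k, rfl⟩ : ∃ k : Nat, i = (k : Int) := ⟨i.toNat, (Int.toNat_of_nonneg h0).symm⟩
  have hcast : ((k : Int) + 3) = (((k + 3 : Nat) : Int)) := by push_cast; ring
  by_cases h : (k : Int) < (words.length : Int) - 3
  · have hk3 : k + 3 ≤ words.length := by omega
    rw [if_pos h, hcast, PySem.List.slice_natCast, PySem.List.slice_natCast,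
        List.drop_append_of_le_length (by omega),
        List.take_append_of_le_length (by simp; omega)]
  · have hkn : k ≤ words.length := by omega
    rw [if_neg h, hcast, map_const_pyRange,
        PySem.List.slice_natCast, PySem.List.slice_natCast,
        List.take_of_length_le (by simp),
        List.drop_append_of_le_length hkn, List.take_append,
        List.take_of_length_le (by simp; omega), List.take_replicate]
    congr 1
    congr 1
    simp only [List.length_drop]
    omega

-- per-index agreement of A's branchy seq_out with a uniform index into the padded list
lemma seq_out_eq (words : List String) (i : Int) (h0 : 0 ≤ i) (h1 : i < (words.length : Int) - 1) :
    (if i < (words.length : Int) - 3 then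
        PySem.List.pyGetD words (i + 3) "\t"
      else ("\t" : String)) =
    PySem.List.pyGetD (words ++ List.replicate 3 "\t") (i + 3) "\t" := by
  obtain ⟨k, rfl⟩ : ∃ k : Nat, i = (k : Int) := ⟨i.toNat, (Int.toNat_of_nonneg h0).symm⟩
  have hcast : ((k : Int) + 3) = (((k + 3 : Nat) : Int)) := by push_cast; ring
  rw [hcast, PySem.List.pyGetD_natCast, PySem.List.pyGetD_natCast]
  by_cases h : (k : Int) < (words.length : Int) - 3
  · have hk3 : k + 3 < words.length := by omega
    rw [if_pos h, List.getD_eq_getElem?_getD, List.getD_eq_getElem?_getD,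
        List.getElem?_append_left (by omega)]
  · have hk3 : words.length ≤ k + 3 := by omega
    rw [if_neg h, List.getD_eq_getElem?_getD,
        List.getElem?_append_right hk3, List.getElem?_replicate,
        if_pos (by omega : k + 3 - words.length < 3)]
    rfl

-- a shifted-and-padded stream reads the padded list at offset k
lemma stream_getElem? (words : List String) (k i : Nat) (hk : k ≤ 3) (hi : i < words.length - 1) :
    (words.drop k ++ List.replicate k ("\t" : String))[i]? =
    (words ++ List.replicate 3 ("\t" : String))[i + k]? := by
  by_cases h : i + k < words.length
  · rw [List.getElem?_append_left (by simp only [List.length_drop]; omega),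
        List.getElem?_append_left h, List.getElem?_drop]
    congr 1; omega
  · rw [List.getElem?_append_right (by simp only [List.length_drop]; omega),
        List.getElem?_append_right (by omega),
        List.getElem?_replicate, List.getElem?_replicate,
        if_pos (by simp only [List.length_drop]; omega),
        if_pos (by omega)]

-- B's slice-built stream, as take of the base list
lemma stream_eq_take (words : List String) (k : Nat) :
    PySem.List.slice (PySem.List.slice words (some (k : Int)) none ++ List.replicate k ("\t" : String))
      none (some (max ((words.length : Int) - 1) 0)) =
    (words.drop k ++ List.replicate k ("\t" : String)).take (words.length - 1) := by
  rw [PySem.List.slice_from_natCast,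
      PySem.List.slice_to _ (le_max_right _ _)]
  congr 1
  omega

-- the dataY stream with its Int-literal offset, as take of the base list
lemma streamY_eq_take (words : List String) :
    PySem.List.slice (PySem.List.slice words (some (3 : Int)) none ++ List.replicate 3 ("\t" : String))
      none (some (max ((words.length : Int) - 1) 0)) =
    (words.drop 3 ++ List.replicate 3 ("\t" : String)).take (words.length - 1) := by
  have h := stream_eq_take words 3
  norm_num at h
  exact h

-- length of B's streams
lemma stream_length (words : List String) (k : Nat) :
    ((words.drop k ++ List.replicate k ("\t" : String)).take (words.length - 1)).length =
    words.length - 1 := by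
  simp only [List.length_take, List.length_append, List.length_drop, List.length_replicate]
  omega

-- take of the first three elements as an explicit triple
lemma take_three {a : Type} (l : List a) (h : 3 ≤ l.length) :
    l.take 3 = [l[0]'(by omega), l[1]'(by omega), l[2]'(by omega)] := by
  match l, h with
  | x :: y :: z :: rest, _ => rfl

-- getElem form of stream_getElem?
lemma stream_getElem (words : List String) (k i : Nat) (hk : k ≤ 3) (hi : i < words.length - 1)
    (h1 : i < (words.drop k ++ List.replicate k ("\t" : String)).length)
    (h2 : i + k < (words ++ List.replicate 3 ("\t" : String)).length) :
    (words.drop k ++ List.replicate k ("\t" : String))[i]'h1 =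
    (words ++ List.replicate 3 ("\t" : String))[i + k]'h2 := by
  have h := stream_getElem? words k i hk hi
  rw [List.getElem?_eq_getElem h1, List.getElem?_eq_getElem h2] at h
  exact Option.some.inj h

-- ===== VERDICT (by name: the statement is the Claim_ definition above) =====
theorem generate_seqs_from_words_spec : Claim_equal_generate_seqs_from_words := by
  intro words _
  show _ = _
  unfold generate_seqs_from_words generate_seqs_from_words_alt
  simp only [apply_ite Prod.fst, apply_ite Prod.snd]
  rw [PySem.List.foldl_prod_mk
      (f := fun (acc : List (List String)) i =>
        acc ++ [if i < (words.length : Int) - 3 then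
            PySem.List.slice words (some i) (some (i + 3))
          else
            PySem.List.slice words (some i) (some (words.length : Int)) ++
              (PySem.List.pyRange 0 (3 - ((words.length : Int) - i)) 1).map (fun _ => ("\t" : String))])
      (g := fun (acc : List String) i =>
        acc ++ [if i < (words.length : Int) - 3 then
            PySem.List.pyGetD words (i + 3) "\t"
          else ("\t" : String)])]
  rw [PySem.List.foldl_append_singleton_eq_map, PySem.List.foldl_append_singleton_eq_map]
  rw [stream_eq_take words 0, stream_eq_take words 1,
      stream_eq_take words 2, streamY_eq_take words]
  set padded : List String := words ++ List.replicate 3 "\t" with hpadded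
  refine Prod.ext ?_ ?_
  · -- dataX
    simp only [List.nil_append]
    apply List.ext_getElem
    · simp only [List.length_map, PySem.List.length_pyRange_one, List.length_zip,
        stream_length words 0, stream_length words 1,
        stream_length words 2]
      omega
    intro i h1 h2
    have hi : i < words.length - 1 := by
      simpa only [List.length_map, PySem.List.length_pyRange_one] using (by omega : i < ((words.length : Int) - 1 - 0).toNat → i < words.length - 1) (by simpa only [List.length_map, PySem.List.length_pyRange_one] using h1)
    have hiI0 : (0 : Int) ≤ (i : Int) := by positivity
    have hiI : (i : Int) < (words.length : Int) - 1 := by omega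
    simp only [List.getElem_map, PySem.List.getElem_pyRange_one, zero_add, List.getElem_zip,
      List.getElem_take]
    rw [seq_in_eq words i hiI0 hiI]
    rw [show ((i : Int) + 3) = ((i : Int) + ((3 : Nat) : Int)) by norm_num,
        PySem.List.slice_natCast_add]
    have hlen : 3 ≤ (padded.drop i).length := by
      simp only [List.length_drop, hpadded, List.length_append, List.length_replicate]
      omega
    rw [take_three _ hlen]
    simp only [List.getElem_drop]
    rw [stream_getElem words 0 i (by omega) hi, stream_getElem words 1 i (by omega) hi,
        stream_getElem words 2 i (by omega) hi]
  · -- dataY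
    simp only [List.nil_append]
    apply List.ext_getElem
    · simp only [List.length_map, PySem.List.length_pyRange_one, List.length_take,
        List.length_append, List.length_drop, List.length_replicate]
      omega
    intro i h1 h2
    have hi : i < words.length - 1 := by
      simpa only [List.length_map, PySem.List.length_pyRange_one] using (by omega : i < ((words.length : Int) - 1 - 0).toNat → i < words.length - 1) (by simpa only [List.length_map, PySem.List.length_pyRange_one] using h1)
    have hiI0 : (0 : Int) ≤ (i : Int) := by positivity
    have hiI : (i : Int) < (words.length : Int) - 1 := by omega
    simp only [List.getElem_map, PySem.List.getElem_pyRange_one, zero_add, List.getElem_take]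
    rw [seq_out_eq words i hiI0 hiI]
    rw [show ((i : Int) + 3) = (((i + 3 : Nat) : Int)) by push_cast; ring,
        PySem.List.pyGetD_natCast]
    rw [stream_getElem words 3 i (by omega) hi]
    rw [List.getD_eq_getElem?_getD, List.getElem?_eq_getElem (by simp only [List.length_append, List.length_replicate] at h2 ⊢; omega)]
    rfl
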